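-- pv_equiv track=rewrite | github.com/amirakm12/aisis | src/ai_swarm/agents/thermal_agent.py | _classify_sensor_type
-- ===== SOURCE A (Python) =====
-- def _classify_sensor_type(device_name: str, location: str) -> str:
--     """Classify sensor type from device name and location"""
--     device_lower = device_name.lower()
--     location_lower = location.lower()
--
--     if any(cpu_indicator in device_lower for cpu_indicator in ["coretemp", "k10temp", "cpu"]):
--         return "cpu"
--     elif any(gpu_indicator in device_lower for gpu_indicator in ["amdgpu", "nvidia", "radeon"]):
--         return "gpu"
--     elif "ambient" in location_lower:
--         return "ambient"
--     elif "vrm" in location_lower or "vdd" in location_lower: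
--         return "vrm"
--     elif "memory" in location_lower or "dimm" in location_lower:
--         return "memory"
--     else:
--         return "system"
-- ===== SOURCE B (Python) =====
-- _KEYWORDS = [
--     ("coretemp", "cpu"), ("k10temp", "cpu"), ("cpu", "cpu"),
--     ("amdgpu", "gpu"), ("nvidia", "gpu"), ("radeon", "gpu"),
--     ("ambient", "ambient"),
--     ("vrm", "vrm"), ("vdd", "vrm"),
--     ("memory", "memory"), ("dimm", "memory"),
-- ]
-- _PRIORITY = {"cpu": 0, "gpu": 1, "ambient": 2, "vrm": 3, "memory": 4, "system": 5}
--
-- def _classify_sensor_type(device_name: str, location: str) -> str: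
--     """Collect ALL matching labels from a flat keyword->label map, then pick the
--     highest-priority one (no short-circuit cascade)."""
--     device_lower = device_name.lower()
--     location_lower = location.lower()
--     matched = [label for kw, label in _KEYWORDS
--                if kw in (device_lower if label in ("cpu", "gpu") else location_lower)]
--     return min(matched + ["system"], key=_PRIORITY.__getitem__)
-- ===== Notes on version B (the rewrite author's own statement) =====
-- stated objective: alternative
-- what changed: Instead of an ordered short-circuit if/elif cascade over grouped indicator lists, B exhaustively collects every matching label from a flat keyword-to-label map and then selects the best one by a numeric priority (min with key), which yields the same result because the cascade order equals the priority order.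
import Mathlib
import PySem

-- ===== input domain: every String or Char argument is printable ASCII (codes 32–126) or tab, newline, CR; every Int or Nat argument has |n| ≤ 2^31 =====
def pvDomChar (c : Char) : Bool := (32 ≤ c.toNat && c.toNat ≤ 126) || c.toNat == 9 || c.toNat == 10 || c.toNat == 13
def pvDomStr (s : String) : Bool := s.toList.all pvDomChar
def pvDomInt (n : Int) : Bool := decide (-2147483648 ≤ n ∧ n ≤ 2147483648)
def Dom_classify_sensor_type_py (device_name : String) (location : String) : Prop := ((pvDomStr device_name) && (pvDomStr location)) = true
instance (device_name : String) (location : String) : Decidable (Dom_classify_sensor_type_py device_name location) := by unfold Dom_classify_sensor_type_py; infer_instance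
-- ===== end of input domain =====

-- B replaces A's short-circuit if/elif cascade by exhaustively collecting all matching labels from a flat keyword->label map and taking the minimum by priority (alternative decomposition, same cost).


-- ===== PORT A =====
def classify_sensor_type_py (device_name : String) (location : String) : String :=
  let device_lower := PySem.Str.lower device_name
  let location_lower := PySem.Str.lower location
  if ["coretemp", "k10temp", "cpu"].any (fun cpu_indicator => PySem.Str.isIn cpu_indicator device_lower) then "cpu"
  else if ["amdgpu", "nvidia", "radeon"].any (fun gpu_indicator => PySem.Str.isIn gpu_indicator device_lower) then "gpu"
  else if PySem.Str.isIn "ambient" location_lower then "ambient"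
  else if PySem.Str.isIn "vrm" location_lower || PySem.Str.isIn "vdd" location_lower then "vrm"
  else if PySem.Str.isIn "memory" location_lower || PySem.Str.isIn "dimm" location_lower then "memory"
  else "system"

-- ===== PORT B =====
-- flat keyword -> label map (Python module constant _KEYWORDS)
def pvKeywords : List (String × String) :=
  [ ("coretemp", "cpu"), ("k10temp", "cpu"), ("cpu", "cpu"),
    ("amdgpu", "gpu"), ("nvidia", "gpu"), ("radeon", "gpu"),
    ("ambient", "ambient"),
    ("vrm", "vrm"), ("vdd", "vrm"),
    ("memory", "memory"), ("dimm", "memory") ]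

-- Python dict lookup _PRIORITY[label] (all looked-up keys are present)
def pvPriority : String → Nat
  | "cpu" => 0 | "gpu" => 1 | "ambient" => 2 | "vrm" => 3 | "memory" => 4 | _ => 5

def classify_sensor_type_py_alt (device_name : String) (location : String) : String :=
  let device_lower := PySem.Str.lower device_name
  let location_lower := PySem.Str.lower location
  let matched := (pvKeywords.filter (fun kl =>
      PySem.Str.isIn kl.1 (if kl.2 == "cpu" || kl.2 == "gpu" then device_lower else location_lower))).map (fun kl => kl.2)
  -- Python's min on a nonempty list; the list always contains "system", so getD is never taken
  (PySem.List.min? (matched ++ ["system"]) pvPriority).getD "system"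

-- ===== PRECONDITION & SPEC =====
def Spec_classify_sensor_type_py (device_name : String) (location : String) (out : String) : Prop := out = classify_sensor_type_py_alt device_name location
instance (device_name : String) (location : String) (out : String) : Decidable (Spec_classify_sensor_type_py device_name location out) := by unfold Spec_classify_sensor_type_py; infer_instance

-- ===== CLAIM (what is proved, stated in full; the proofs are below) =====
def Claim_equal_classify_sensor_type_py : Prop := ∀ (device_name : String) (location : String), Dom_classify_sensor_type_py device_name location → Spec_classify_sensor_type_py device_name location (classify_sensor_type_py device_name location)

-- ===== LEMMAS AND PROOFS =====

-- ===== VERDICT (by name: the statement is the Claim_ definition above) =====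
theorem classify_sensor_type_py_spec : Claim_equal_classify_sensor_type_py := by
  intro device_name location _
  unfold Spec_classify_sensor_type_py classify_sensor_type_py classify_sensor_type_py_alt
  simp only [pvKeywords, List.any_cons, List.any_nil, Bool.or_false, List.filter,
    String.reduceBEq, Bool.or_self, Bool.or_true, reduceCtorEq, ite_true, ite_false]
  generalize PySem.Str.isIn "coretemp" (PySem.Str.lower device_name) = b1
  generalize PySem.Str.isIn "k10temp" (PySem.Str.lower device_name) = b2
  generalize PySem.Str.isIn "cpu" (PySem.Str.lower device_name) = b3
  generalize PySem.Str.isIn "amdgpu" (PySem.Str.lower device_name) = b4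
  generalize PySem.Str.isIn "nvidia" (PySem.Str.lower device_name) = b5
  generalize PySem.Str.isIn "radeon" (PySem.Str.lower device_name) = b6
  generalize PySem.Str.isIn "ambient" (PySem.Str.lower location) = b7
  generalize PySem.Str.isIn "vrm" (PySem.Str.lower location) = b8
  generalize PySem.Str.isIn "vdd" (PySem.Str.lower location) = b9
  generalize PySem.Str.isIn "memory" (PySem.Str.lower location) = b10
  generalize PySem.Str.isIn "dimm" (PySem.Str.lower location) = b11
  revert b1 b2 b3 b4 b5 b6 b7 b8 b9 b10 b11
  decide
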